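-- pv_equiv track=rewrite | github.com/HoangLeKimLam/String-matching | Two_way.py | max_suffix
-- ===== SOURCE A (Python) =====
-- def max_suffix(s):
--     """
--     Tìm max suffix để xác định critical position.
--
--     Hàm này được dùng trong thuật toán Crochemore–Perrin
--     để xác định vị trí phân tách pattern.
--     """
--
--     n = len(s)
--
--     ms = -1      # vị trí max suffix
--     j = 0
--     k = 1
--     p = 1       # period tạm thời
--
--     while j + k < n:
--
--         if s[j + k] == s[ms + k]:
--             if k == p:
--                 j += p
--                 k = 1
--             else:
--                 k += 1
--
--         elif s[j + k] > s[ms + k]: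
--             j += k
--             k = 1
--             p = j - ms
--
--         else:
--             ms = j
--             j = ms + 1
--             k = p = 1
--
--     return ms, p
-- ===== SOURCE B (Python) =====
-- def _sufless(u, v):
--     # True iff suffix u precedes suffix v in the order: lexicographic, except
--     # that a proper prefix of a word comes AFTER that word (the longer run wins).
--     if u.startswith(v):
--         return True
--     if v.startswith(u):
--         return False
--     return u < v
--
--
-- def max_suffix(s):
--     n = len(s)
--     best = 0
--     for q in range(1, n):
--         a, b = s[q], s[best]
--         if a < b:
--             best = q
--         elif a == b and _sufless(s[q:], s[best:]):
--             best = q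
--     suf = s[best:]
--     m = len(suf)
--     p = 1
--     for cand in range(1, m + 1):
--         if all(suf[t] == suf[t + cand] for t in range(m - cand)):
--             p = cand
--             break
--     return best - 1, p
-- ===== Notes on version B (the rewrite author's own statement) =====
-- stated objective: simpler
-- what changed: Replaced the integrated single-pass candidate/period index dance (ms/j/k/p two-way scan) by two direct definition-style passes: an argmin scan over all suffix start positions under the order lexicographic-with-proper-prefix-ranking-after-the-longer-word (best = start of that minimal suffix, ms = best-1), followed by a smallest-period search on the selected suffix.
import Mathlib
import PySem

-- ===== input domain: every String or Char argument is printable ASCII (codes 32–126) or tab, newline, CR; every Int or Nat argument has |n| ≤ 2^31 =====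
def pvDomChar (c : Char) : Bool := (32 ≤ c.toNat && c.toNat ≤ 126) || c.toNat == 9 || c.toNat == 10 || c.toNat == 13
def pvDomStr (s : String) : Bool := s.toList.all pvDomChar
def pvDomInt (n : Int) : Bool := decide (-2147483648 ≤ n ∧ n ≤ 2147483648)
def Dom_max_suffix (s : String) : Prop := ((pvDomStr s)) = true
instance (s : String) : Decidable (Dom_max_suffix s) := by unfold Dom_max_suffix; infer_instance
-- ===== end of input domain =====

-- B replaces A's integrated single-pass candidate/period maintenance by two direct
-- definition-style passes (argmin over suffix start positions, then a smallest-period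
-- search on the chosen suffix); objective: simpler, not faster.

-- ===== PORT A =====
-- s[idx] for an Int index; every access A makes is in range, the default is never
-- reached on the states the top-level call produces.
def pvChA (s : List Char) (i : Int) : Char := (PySem.List.pyGet? s i).getD default

-- the while loop, with fuel (2*len+2 suffices; proved below)
def pvLoopA : Nat → List Char → Int → Int → Int → Int → Int × Int
  | 0, _, ms, _, _, p => (ms, p)
  | fuel+1, s, ms, j, k, p =>
    if j + k < PySem.List.len s then
      if pvChA s (j + k) = pvChA s (ms + k) then
        (if k = p then pvLoopA fuel s ms (j + p) 1 p
         else pvLoopA fuel s ms j (k + 1) p)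
      else if pvChA s (ms + k) < pvChA s (j + k) then
        pvLoopA fuel s ms (j + k) 1 (j + k - ms)
      else pvLoopA fuel s j (j + 1) 1 1
    else (ms, p)

def max_suffix (s : String) : Int × Int :=
  pvLoopA (2 * s.toList.length + 2) s.toList (-1) 0 1 1

-- ===== PORT B =====
-- Python string comparison u < v (plain lexicographic)
def pvLexLt : List Char → List Char → Bool
  | _, [] => false
  | [], _ :: _ => true
  | a :: u, b :: v => if a = b then pvLexLt u v else decide (a < b)

-- _sufless: u before v in the order
-- lexicographic, except that a proper prefix ranks after the longer word
def pvSufLess (u v : List Char) : Bool :=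
  if v.isPrefixOf u then true
  else if u.isPrefixOf v then false
  else pvLexLt u v

-- for q in range(1, n): first characters, then the full comparison on a tie
def pvBestAux (l : List Char) (q best : Nat) : Nat :=
  if h : q < l.length then
    pvBestAux l (q + 1)
      (if l.getD q default < l.getD best default then q
       else if (l.getD q default == l.getD best default) &&
           pvSufLess (l.drop q) (l.drop best) then q
       else best)
  else best
termination_by l.length - q
decreasing_by omega

-- all(suf[t] == suf[t + cand] for t in range(m - cand))
def pvAllEq (suf : List Char) (cand : Nat) : Bool :=
  (List.range (suf.length - cand)).all
    (fun t => suf.getD t default == suf.getD (t + cand) default)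

-- for cand in range(1, m + 1): if all(...): p = cand; break   (p = 1 if the loop finds nothing)
def pvPerAux (suf : List Char) (cand : Nat) : Nat :=
  if h : cand ≤ suf.length then
    (if pvAllEq suf cand then cand else pvPerAux suf (cand + 1))
  else 1
termination_by suf.length + 1 - cand
decreasing_by omega

def max_suffix_alt (s : String) : Int × Int :=
  let l := s.toList
  let best := pvBestAux l 1 0
  let suf := l.drop best
  ((best : Int) - 1, (pvPerAux suf 1 : Int))

-- ===== PRECONDITION & SPEC =====
def Spec_max_suffix (s : String) (out : Int × Int) : Prop := out = max_suffix_alt s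
instance (s : String) (out : Int × Int) : Decidable (Spec_max_suffix s out) := by unfold Spec_max_suffix; infer_instance

-- ===== CLAIM (what is proved, stated in full; the proofs are below) =====
def Claim_equal_max_suffix : Prop := ∀ (s : String), Dom_max_suffix s → Spec_max_suffix s (max_suffix s)

-- ===== LEMMAS AND PROOFS =====

def pvLtB : List Char → List Char → Bool
  | [], _ => false
  | _ :: _, [] => true
  | a :: u, b :: v => if a = b then pvLtB u v else decide (a < b)

theorem pvSufLess_eq_ltB : ∀ u v : List Char, u ≠ v → pvSufLess u v = pvLtB u v := by
  intro u
  induction u with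
  | nil => intro v hne; cases v with
    | nil => simp at hne
    | cons b v => simp [pvSufLess, pvLtB, List.isPrefixOf]
  | cons a u ih =>
    intro v hne
    cases v with
    | nil => simp [pvSufLess, pvLtB, List.isPrefixOf]
    | cons b v =>
      by_cases hab : a = b
      · subst hab
        have hne' : u ≠ v := by intro h; exact hne (by rw [h])
        have := ih v hne'
        simp [pvSufLess, pvLtB, pvLexLt, List.isPrefixOf] at this ⊢
        exact this
      · simp [pvSufLess, pvLtB, pvLexLt, List.isPrefixOf, hab, Ne.symm hab]

theorem pvLtB_asymm : ∀ u v : List Char, pvLtB u v = true → pvLtB v u = false := by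
  intro u
  induction u with
  | nil => intro v h; cases v <;> simp [pvLtB] at h ⊢
  | cons a u ih =>
    intro v h
    cases v with
    | nil => simp [pvLtB]
    | cons b v =>
      by_cases hab : a = b
      · subst hab; simp [pvLtB] at h ⊢; exact ih v h
      · simp [pvLtB, hab, Ne.symm hab] at h ⊢
        exact le_of_lt h

theorem pvLtB_total : ∀ u v : List Char, u ≠ v → pvLtB u v = true ∨ pvLtB v u = true := by
  intro u
  induction u with
  | nil => intro v h; cases v with
    | nil => simp at h
    | cons b v => right; simp [pvLtB]
  | cons a u ih =>
    intro v h
    cases v with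
    | nil => left; simp [pvLtB]
    | cons b v =>
      by_cases hab : a = b
      · subst hab
        have : u ≠ v := fun hh => h (by rw [hh])
        simpa [pvLtB] using ih v this
      · simp [pvLtB, hab, Ne.symm hab]

theorem pvLtB_trans : ∀ u v w : List Char,
    pvLtB u v = true → pvLtB v w = true → pvLtB u w = true := by
  intro u
  induction u with
  | nil => intro v w h _; cases v <;> simp [pvLtB] at h
  | cons a u ih =>
    intro v w h1 h2
    cases v with
    | nil => cases w <;> simp [pvLtB] at h2
    | cons b v =>
      cases w with
      | nil => simp [pvLtB]
      | cons c w =>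
        by_cases hab : a = b <;> by_cases hbc : b = c
        · subst hab hbc; simp [pvLtB] at h1 h2 ⊢; exact ih v w h1 h2
        · subst hab; simp [pvLtB, hbc] at h2 ⊢; exact h2
        · subst hbc; simp [pvLtB, hab] at h1 ⊢; exact h1
        · simp [pvLtB, hab, hbc] at h1 h2
          by_cases hac : a = c
          · subst hac; simp [pvLtB]; exact absurd (lt_trans h1 h2) (lt_irrefl a)
          · simp [pvLtB, hac]; exact lt_trans h1 h2

theorem pvLtB_of_mismatch : ∀ (o : Nat) (x y : List Char),
    (∀ o', o' < o → x.getD o' default = y.getD o' default) →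
    o < x.length → o < y.length →
    x.getD o default < y.getD o default → pvLtB x y = true := by
  intro o
  induction o with
  | zero =>
    intro x y _ hx hy hlt
    cases x with
    | nil => simp at hx
    | cons a u =>
      cases y with
      | nil => simp at hy
      | cons b v =>
        simp [List.getD] at hlt
        have : a ≠ b := ne_of_lt hlt
        simp [pvLtB, this, hlt]
  | succ o ih =>
    intro x y hpre hx hy hlt
    cases x with
    | nil => simp at hx
    | cons a u =>
      cases y with
      | nil => simp at hy
      | cons b v =>
        have hab : a = b := by
          have := hpre 0 (Nat.succ_pos o); simpa [List.getD] using this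
        subst hab
        simp [pvLtB]
        exact ih u v (fun o' ho' => by
            have := hpre (o' + 1) (by omega); simpa [List.getD] using this)
          (by simpa using hx) (by simpa using hy) (by simpa [List.getD] using hlt)

theorem pvLtB_of_proper_prefix : ∀ (x y : List Char),
    x.length < y.length →
    (∀ o, o < x.length → x.getD o default = y.getD o default) →
    pvLtB y x = true := by
  intro x
  induction x with
  | nil => intro y hlen _; cases y with
    | nil => simp at hlen
    | cons b v => simp [pvLtB]
  | cons a u ih =>
    intro y hlen hpre
    cases y with
    | nil => simp at hlen
    | cons b v =>
      have hab : a = b := by have := hpre 0 (by simp); simpa [List.getD] using this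
      subst hab
      simp [pvLtB]
      exact ih v (by simpa using hlen) (fun o ho => by
        have := hpre (o + 1) (by simpa using ho); simpa [List.getD] using this)

theorem pvDrop_ne (l : List Char) (a b : Nat) (ha : a < l.length) (hb : b < l.length)
    (hne : a ≠ b) : l.drop a ≠ l.drop b := by
  intro hh
  have := congrArg List.length hh
  simp [List.length_drop] at this
  omega

theorem pvBestAux_inv : ∀ (cnt : Nat) (l : List Char) (q best : Nat), l.length - q = cnt →
    best < q → (best < l.length ∨ best = 0) →
    (∀ r, r < q → r ≠ best → pvLtB (l.drop best) (l.drop r) = true) →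
    ((pvBestAux l q best < l.length ∨ pvBestAux l q best = 0) ∧
     ∀ r, r < l.length → r ≠ pvBestAux l q best →
       pvLtB (l.drop (pvBestAux l q best)) (l.drop r) = true) := by
  intro cnt
  induction cnt with
  | zero =>
    intro l q best hcnt hbq hbl hmin
    have hq : l.length ≤ q := by omega
    rw [pvBestAux, dif_neg (by omega)]
    exact ⟨hbl, fun r hr hrb => hmin r (by omega) hrb⟩
  | succ cnt ih =>
    intro l q best hcnt hbq hbl hmin
    have hq : q < l.length := by omega
    rw [pvBestAux, dif_pos hq]
    have hblen : best < l.length := by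
      rcases hbl with h | h
      · exact h
      · omega
    have hne : l.drop q ≠ l.drop best := pvDrop_ne l q best hq hblen (by omega)
    have hcq := List.drop_eq_getElem_cons hq
    have hcb := List.drop_eq_getElem_cons hblen
    have hstep : (if l.getD q default < l.getD best default then q
        else if (l.getD q default == l.getD best default) &&
            pvSufLess (l.drop q) (l.drop best) then q
        else best)
        = if pvLtB (l.drop q) (l.drop best) then q else best := by
      rw [pvSufLess_eq_ltB _ _ hne]
      rw [List.getD_eq_getElem l default hq, List.getD_eq_getElem l default hblen]
      by_cases hab : l[q] = l[best]
      · simp only [hab, lt_irrefl, if_false, beq_self_eq_true, Bool.true_and]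
      · have h1 : pvLtB (l.drop q) (l.drop best) = decide (l[q] < l[best]) := by
          rw [hcq, hcb]
          simp [pvLtB, hab]
        rw [h1]
        by_cases hlt : l[q] < l[best]
        · simp [hlt]
        · simp [hlt]
    rw [hstep]
    by_cases htk : pvLtB (l.drop q) (l.drop best) = true
    · rw [if_pos htk]
      refine ih l (q + 1) q (by omega) (by omega) (Or.inl hq) ?_
      intro r hr hrq
      by_cases hrb : r = best
      · subst hrb; exact htk
      · exact pvLtB_trans _ _ _ htk (hmin r (by omega) hrb)
    · rw [if_neg htk]
      refine ih l (q + 1) best (by omega) (by omega) hbl ?_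
      intro r hr hrb
      by_cases hrq : r = q
      · subst hrq
        rcases pvLtB_total (l.drop best) (l.drop r) (Ne.symm hne) with h | h
        · exact h
        · exact absurd h htk
      · exact hmin r (by omega) hrb

theorem pvBestAux_lt_length : ∀ (l : List Char), l ≠ [] → pvBestAux l 1 0 < l.length := by
  intro l hl
  have hlen : 1 ≤ l.length := by
    cases l with
    | nil => simp at hl
    | cons a u => simp
  have := pvBestAux_inv (l.length - 1) l 1 0 rfl (by omega) (Or.inr rfl)
    (fun r hr hrb => by omega)
  omega

theorem pvBestAux_isMin : ∀ (l : List Char) (q : Nat), q < l.length →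
    q ≠ pvBestAux l 1 0 → pvLtB (l.drop (pvBestAux l 1 0)) (l.drop q) = true := by
  intro l q hq hne
  have := pvBestAux_inv (l.length - 1) l 1 0 rfl (by omega) (Or.inr rfl)
    (fun r hr hrb => by omega)
  exact this.2 q hq hne

theorem pvBestAux_eq : ∀ (l : List Char) (X : Nat), X < l.length →
    (∀ q, q < l.length → q ≠ X → pvLtB (l.drop X) (l.drop q) = true) →
    pvBestAux l 1 0 = X := by
  intro l X hX hmin
  by_contra hne
  have h1 := pvBestAux_isMin l X hX (fun h => hne h.symm)
  have hlt := pvBestAux_lt_length l (by intro h; subst h; simp at hX)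
  have h2 := hmin (pvBestAux l 1 0) hlt hne
  have := pvLtB_asymm _ _ h1
  rw [h2] at this
  exact absurd this (by simp)

theorem pvAllEq_iff : ∀ (suf : List Char) (q : Nat),
    pvAllEq suf q = true ↔ ∀ t, t + q < suf.length →
      suf.getD t default = suf.getD (t + q) default := by
  intro suf q
  unfold pvAllEq
  rw [List.all_eq_true]
  constructor
  · intro h t ht
    have := h t (by rw [List.mem_range]; omega)
    simpa using this
  · intro h t ht
    rw [List.mem_range] at ht
    simpa using h t (by omega)

theorem pvPerAux_spec : ∀ (cnt : Nat) (suf : List Char) (p p0 : Nat), p - p0 = cnt →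
    1 ≤ p0 → p0 ≤ p →
    (p ≤ suf.length ∨ (suf.length = 0 ∧ p = 1)) →
    (∀ q, p0 ≤ q → q < p → pvAllEq suf q = false) →
    pvAllEq suf p = true →
    pvPerAux suf p0 = p := by
  intro cnt
  induction cnt with
  | zero =>
    intro suf p p0 hcnt h1 hle hlen hfail hok
    have : p0 = p := by omega
    subst this
    rcases hlen with h | h
    · rw [pvPerAux, dif_pos h, if_pos hok]
    · rw [pvPerAux, dif_neg (by omega)]
      omega
  | succ cnt ih =>
    intro suf p p0 hcnt h1 hle hlen hfail hok
    have hp0 : p0 < p := by omega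
    have hp0len : p0 ≤ suf.length := by omega
    rw [pvPerAux, dif_pos hp0len, if_neg (by simp [hfail p0 le_rfl hp0])]
    exact ih suf p (p0 + 1) (by omega) (by omega) (by omega) hlen
      (fun q hq hq' => hfail q (by omega) hq') hok

def pvCh (s : List Char) (o : Nat) : Char := s.getD o default

theorem pvChain {s : List Char} {p i : Nat}
    (hper : ∀ o, o + p < i → pvCh s (o + p) = pvCh s o) :
    ∀ q, p ∣ q → ∀ o, q + o < i → pvCh s (q + o) = pvCh s o := by
  rintro q ⟨m, rfl⟩ o
  induction m generalizing o with
  | zero => intro _; simp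
  | succ m ih =>
    intro hbound
    have h1 : p * (m + 1) + o = (p * m + o) + p := by ring
    rw [h1, hper (p * m + o) (by omega)]
    exact ih o (by nlinarith)

def pvLoopN : Nat → List Char → Nat → Nat → Nat → Nat → Nat × Nat
  | 0, _, c, _, _, p => (c, p)
  | fuel+1, s, c, f, t, p =>
    if f + t < s.length then
      if pvCh s (f + t) = pvCh s (c + t) then
        (if t + 1 = p then pvLoopN fuel s c (f + p) 0 p
         else pvLoopN fuel s c f (t + 1) p)
      else if pvCh s (c + t) < pvCh s (f + t) then
        pvLoopN fuel s c (f + t + 1) 0 (f + t + 1 - c)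
      else pvLoopN fuel s f (f + 1) 0 1
    else (c, p)

theorem pvCh_drop (s : List Char) (d x : Nat) : pvCh (s.drop d) x = pvCh s (d + x) := by
  simp [pvCh, List.getD, List.getElem?_drop]

theorem pvGetD_drop (s : List Char) (d x : Nat) :
    (s.drop d).getD x default = s.getD (d + x) default := pvCh_drop s d x

theorem pvLoopN_drop (d : Nat) : ∀ (fuel : Nat) (s : List Char) (c f t p : Nat),
    d ≤ c → c ≤ f →
    pvLoopN fuel s c f t p =
      (fun x : Nat × Nat => (x.1 + d, x.2)) (pvLoopN fuel (s.drop d) (c - d) (f - d) t p) := by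
  intro fuel
  induction fuel with
  | zero =>
    intro s c f t p hdc hcf
    simp [pvLoopN]
    omega
  | succ fuel ih =>
    intro s c f t p hdc hcf
    have hg : (f + t < s.length) ↔ ((f - d) + t < (s.drop d).length) := by
      simp [List.length_drop]; omega
    by_cases hguard : f + t < s.length
    · have hguard' := hg.mp hguard
      have ha : pvCh (s.drop d) (f - d + t) = pvCh s (f + t) := by
        rw [pvCh_drop]; congr 1; omega
      have hb : pvCh (s.drop d) (c - d + t) = pvCh s (c + t) := by
        rw [pvCh_drop]; congr 1; omega
      rw [pvLoopN, if_pos hguard]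
      conv_rhs => rw [pvLoopN]
      rw [if_pos hguard', ha, hb]
      by_cases he : pvCh s (f + t) = pvCh s (c + t)
      · rw [if_pos he, if_pos he]
        by_cases htp : t + 1 = p
        · rw [if_pos htp, if_pos htp]
          have h1 : f + p - d = (f - d) + p := by omega
          rw [ih s c (f + p) 0 p hdc (by omega), h1]
        · rw [if_neg htp, if_neg htp]
          exact ih s c f (t + 1) p hdc hcf
      · rw [if_neg he, if_neg he]
        by_cases hlt : pvCh s (c + t) < pvCh s (f + t)
        · rw [if_pos hlt, if_pos hlt]
          have h1 : f + t + 1 - d = (f - d) + t + 1 := by omega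
          have h2 : (f - d) + t + 1 - (c - d) = f + t + 1 - c := by omega
          rw [ih s c (f + t + 1) 0 (f + t + 1 - c) hdc (by omega), h1, h2]
        · rw [if_neg hlt, if_neg hlt]
          have h1 : f + 1 - d = (f - d) + 1 := by omega
          have h2 : f - d = f - d := rfl
          rw [ih s f (f + 1) 0 1 (by omega) (by omega), h1]
    · rw [pvLoopN, if_neg hguard]
      conv_rhs => rw [pvLoopN]
      rw [if_neg (by rw [← hg]; exact hguard)]
      simp
      omega

def pvCert (s : List Char) (q i : Nat) : Prop :=
  ∃ o, q + o < i ∧ (∀ o', o' < o → pvCh s o' = pvCh s (q + o')) ∧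
    pvCh s o < pvCh s (q + o)

def pvInv (s : List Char) (f t p : Nat) : Prop :=
  t < p ∧ p ∣ f ∧ 1 ≤ f ∧ f + t ≤ s.length ∧
  (∀ o, o + p < f + t → pvCh s (o + p) = pvCh s o) ∧
  (∀ e, 1 ≤ e → e < p → pvCert s e p) ∧
  (∀ q, 1 ≤ q → q ≤ f → ¬ p ∣ q → pvCert s q (f + t))

theorem pvCert_mono {s : List Char} {q i i' : Nat} (h : i ≤ i') (hc : pvCert s q i) :
    pvCert s q i' := by
  obtain ⟨o, h1, h2, h3⟩ := hc
  exact ⟨o, by omega, h2, h3⟩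

-- the scanned block s[f..f+t) repeats s[0..t), and one step further on equality
theorem pvMatched {s : List Char} {f t p : Nat} (hpf : p ∣ f) (_hp : p ≤ f)
    (hper : ∀ o, o + p < f + t → pvCh s (o + p) = pvCh s o) :
    ∀ ω, ω < t → pvCh s (f + ω) = pvCh s ω := by
  intro ω hω
  exact pvChain hper f hpf ω (by omega)

-- s[f+t-p] = s[t] (the character the equality branch compares against, one period back)
theorem pvBackOne {s : List Char} {f t p : Nat} (hpf : p ∣ f) (hp1 : 1 ≤ p) (hp : p ≤ f)
    (hper : ∀ o, o + p < f + t → pvCh s (o + p) = pvCh s o) :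
    pvCh s ((f - p) + t) = pvCh s t := by
  exact pvChain hper (f - p) (Nat.dvd_sub hpf dvd_rfl) t (by omega)

theorem pvInv_E_ne {s : List Char} {f t p : Nat} (inv : pvInv s f t p)
    (hguard : f + t < s.length) (he : pvCh s (f + t) = pvCh s t)
    (htp : t + 1 ≠ p) : pvInv s f (t + 1) p := by
  obtain ⟨htlt, hpf, hf1, _, hper, hlyn, hmin⟩ := inv
  have hp1 : 1 ≤ p := by omega
  have hpf' : p ≤ f := Nat.le_of_dvd (by omega) hpf
  refine ⟨by omega, hpf, hf1, by omega, ?_, hlyn, ?_⟩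
  · intro o ho
    by_cases hlt : o + p < f + t
    · exact hper o hlt
    · have ho' : o + p = f + t := by omega
      have hoeq : o = (f - p) + t := by omega
      rw [ho', hoeq, he, pvBackOne hpf hp1 hpf' hper]
  · intro q h1 h2 h3
    exact pvCert_mono (by omega) (hmin q h1 h2 h3)

theorem pvInv_E_eq {s : List Char} {f t p : Nat} (inv : pvInv s f t p)
    (hguard : f + t < s.length) (he : pvCh s (f + t) = pvCh s t)
    (htp : t + 1 = p) : pvInv s (f + p) 0 p := by
  obtain ⟨htlt, hpf, hf1, _, hper, hlyn, hmin⟩ := inv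
  have hp1 : 1 ≤ p := by omega
  have hpf' : p ≤ f := Nat.le_of_dvd (by omega) hpf
  -- the whole next period block repeats s[0..p)
  have hw : ∀ ω, ω < p → pvCh s (f + ω) = pvCh s ω := by
    intro ω hω
    by_cases hωt : ω < t
    · exact pvMatched hpf hpf' hper ω hωt
    · have : ω = t := by omega
      subst this; exact he
  refine ⟨by omega, Dvd.dvd.add hpf dvd_rfl, by omega, by omega, ?_, hlyn, ?_⟩
  · intro o ho
    by_cases hlt : o + p < f + t
    · exact hper o hlt
    · have ho' : o + p = f + t := by omega
      have hoeq : o = (f - p) + t := by omega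
      rw [ho', hoeq, he, pvBackOne hpf hp1 hpf' hper]
  · intro q h1 h2 h3
    by_cases hqf : q ≤ f
    · exact pvCert_mono (by omega) (hmin q h1 hqf h3)
    · have he1 : 1 ≤ q - f := by omega
      have he2 : q - f < p := by
        rcases Nat.lt_or_ge (q - f) p with h | h
        · exact h
        · exfalso
          have : q = f + p := by omega
          exact h3 (this ▸ Dvd.dvd.add hpf dvd_rfl)
      obtain ⟨o, hoe, hpfx, hmis⟩ := hlyn (q - f) he1 he2
      refine ⟨o, by omega, ?_, ?_⟩
      · intro o' ho'
        have h4 : q + o' = f + ((q - f) + o') := by omega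
        rw [h4, hw ((q - f) + o') (by omega)]
        exact hpfx o' ho'
      · have h4 : q + o = f + ((q - f) + o) := by omega
        rw [h4, hw ((q - f) + o) (by omega)]
        exact hmis

-- s[0] ≤ s[t] at any invariant state
theorem pvHeadLe {s : List Char} {f t p : Nat} (inv : pvInv s f t p) :
    pvCh s 0 ≤ pvCh s t := by
  obtain ⟨htlt, hpf, hf1, hlen, hper, hlyn, hmin⟩ := inv
  rcases Nat.eq_zero_or_pos t with h | h
  · subst h; exact le_rfl
  · have hpf' : p ≤ f := Nat.le_of_dvd (by omega) hpf
    have hnd : ¬ p ∣ t := by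
      intro hd
      have := Nat.le_of_dvd h hd
      omega
    obtain ⟨o, hoi, hpfx, hmis⟩ := hmin t h (by omega) hnd
    rcases Nat.eq_zero_or_pos o with ho | ho
    · subst ho; simpa using le_of_lt hmis
    · have := hpfx 0 ho
      simp at this
      rw [this]

theorem pvInv_F {s : List Char} {f t p : Nat} (inv : pvInv s f t p)
    (hguard : f + t < s.length) (hlt : pvCh s t < pvCh s (f + t)) :
    pvInv s (f + t + 1) 0 (f + t + 1) := by
  have hhead := pvHeadLe inv
  obtain ⟨htlt, hpf, hf1, hlen, hper, hlyn, hmin⟩ := inv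
  have hp1 : 1 ≤ p := by omega
  have hpf' : p ≤ f := Nat.le_of_dvd (by omega) hpf
  have hw2 : ∀ ω, ω < t → pvCh s (f + ω) = pvCh s ω := pvMatched hpf hpf' hper
  -- certificates for every position 1 ≤ e ≤ f + t within window f+t+1
  have hcerts : ∀ e, 1 ≤ e → e ≤ f + t → pvCert s e (f + t + 1) := by
    intro e he1 heft
    by_cases hpe : p ∣ e
    · -- a multiple of p: full agreement up to the fresh mismatching character
      have hef : e ≤ f := by
        by_contra hh
        have : f + p ≤ e := by
          rcases hpf with ⟨m, rfl⟩
          rcases hpe with ⟨m', rfl⟩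
          have : m < m' := by nlinarith [Nat.lt_of_not_le hh]
          nlinarith
        omega
      refine ⟨f + t - e, by omega, ?_, ?_⟩
      · intro o' ho'
        exact (pvChain hper e hpe o' (by omega)).symm
      · have h4 : e + (f + t - e) = f + t := by omega
        rw [h4]
        have h5 : f + t - e = (f - e) + t := by omega
        rw [h5, pvChain hper (f - e) (Nat.dvd_sub hpf hpe) t (by omega)]
        exact hlt
    · by_cases hef : e ≤ f
      · exact pvCert_mono (by omega) (hmin e he1 hef hpe)
      · -- f < e ≤ f + t : position inside the matched block
        by_cases heq : e = f + t
        · -- only the fresh character is visible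
          refine ⟨0, by omega, by omega, ?_⟩
          have : pvCh s (e + 0) = pvCh s (f + t) := by simp [heq]
          rw [this]
          exact lt_of_le_of_lt hhead hlt
        · have he2 : 1 ≤ e - f := by omega
          have he3 : e - f < t := by omega
          obtain ⟨o, hoe, hpfx, hmis⟩ := hlyn (e - f) he2 (by omega)
          by_cases hot : (e - f) + o < t
          · refine ⟨o, by omega, ?_, ?_⟩
            · intro o' ho'
              have h4 : e + o' = f + ((e - f) + o') := by omega
              rw [h4, hw2 ((e - f) + o') (by omega)]
              exact hpfx o' ho'
            · have h4 : e + o = f + ((e - f) + o) := by omega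
              rw [h4, hw2 ((e - f) + o) (by omega)]
              exact hmis
          · -- the certificate runs off the matched block: mismatch at the fresh character
            refine ⟨t - (e - f), by omega, ?_, ?_⟩
            · intro o' ho'
              have h4 : e + o' = f + ((e - f) + o') := by omega
              rw [h4, hw2 ((e - f) + o') (by omega)]
              exact hpfx o' (by omega)
            · have h4 : e + (t - (e - f)) = f + t := by omega
              rw [h4]
              rcases Nat.lt_or_ge (t - (e - f)) o with hcase | hcase
              · have := hpfx (t - (e - f)) hcase
                have h5 : (e - f) + (t - (e - f)) = t := by omega
                rw [h5] at this
                rw [this]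
                exact hlt
              · have ho' : o = t - (e - f) := by omega
                subst ho'
                have h5 : (e - f) + (t - (e - f)) = t := by omega
                rw [h5] at hmis
                exact lt_trans hmis hlt
  refine ⟨by omega, dvd_rfl, by omega, by omega, ?_, ?_, ?_⟩
  · intro o ho
    exact absurd ho (by omega)
  · intro e he1 he2
    exact hcerts e he1 (by omega)
  · intro q h1 h2 h3
    have : q ≠ f + t + 1 := by
      intro hh
      exact h3 (hh ▸ dvd_rfl)
    exact hcerts q h1 (by omega)

def pvBSpec (l : List Char) : Nat × Nat :=
  (pvBestAux l 1 0, pvPerAux (l.drop (pvBestAux l 1 0)) 1)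

-- at loop exit (window = whole string): position 0 is the strict minimum
theorem pvExit_best {s : List Char} {f t p : Nat} (inv : pvInv s f t p)
    (hend : f + t = s.length) :
    ∀ q, q < s.length → q ≠ 0 → pvLtB s (s.drop q) = true := by
  obtain ⟨htlt, hpf, hf1, hlen, hper, hlyn, hmin⟩ := inv
  have hp1 : 1 ≤ p := by omega
  have hpf' : p ≤ f := Nat.le_of_dvd (by omega) hpf
  have hw2 : ∀ ω, ω < t → pvCh s (f + ω) = pvCh s ω := pvMatched hpf hpf' hper
  intro q hq hq0
  by_cases hqf : q ≤ f
  · by_cases hpq : p ∣ q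
    · -- s[q:] is a proper prefix of s
      apply pvLtB_of_proper_prefix (s.drop q) s (by simp [List.length_drop]; omega)
      intro o ho
      rw [List.length_drop] at ho
      show (s.drop q).getD o default = s.getD o default
      rw [pvGetD_drop s q o]
      exact pvChain hper q hpq o (by omega)
    · obtain ⟨o, hoi, hpfx, hmis⟩ := hmin q (by omega) hqf hpq
      apply pvLtB_of_mismatch o s (s.drop q)
      · intro o' ho'
        show s.getD o' default = (s.drop q).getD o' default
        rw [pvGetD_drop s q o']
        exact hpfx o' ho'
      · omega
      · simp [List.length_drop]; omega
      · show s.getD o default < (s.drop q).getD o default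
        rw [pvGetD_drop s q o]
        exact hmis
  · -- f < q < n : inside the matched block
    have he2 : 1 ≤ q - f := by omega
    have he3 : q - f < t := by omega
    obtain ⟨o, hoe, hpfx, hmis⟩ := hlyn (q - f) he2 (by omega)
    have hagree : ∀ ω, ω < o → ω + q < s.length → s.getD ω default = (s.drop q).getD ω default := by
      intro ω hω hωq
      rw [pvGetD_drop s q ω]
      have h4 : q + ω = f + ((q - f) + ω) := by omega
      rw [h4]
      show pvCh s ω = pvCh s (f + ((q - f) + ω))
      rw [hw2 ((q - f) + ω) (by omega)]
      exact hpfx ω hω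
    by_cases hot : (q - f) + o < t
    · apply pvLtB_of_mismatch o s (s.drop q)
      · intro o' ho'
        exact hagree o' ho' (by omega)
      · omega
      · simp [List.length_drop]; omega
      · rw [pvGetD_drop s q o]
        have h4 : q + o = f + ((q - f) + o) := by omega
        show pvCh s o < pvCh s (q + o)
        rw [h4, hw2 ((q - f) + o) (by omega)]
        exact hmis
    · -- full agreement to the end: s[q:] is a proper prefix of s
      apply pvLtB_of_proper_prefix (s.drop q) s (by simp [List.length_drop]; omega)
      intro ω hω
      rw [List.length_drop] at hω
      exact (hagree ω (by omega) (by omega)).symm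

theorem pvExit_per {s : List Char} {f t p : Nat} (inv : pvInv s f t p)
    (hend : f + t = s.length) : pvPerAux s 1 = p := by
  obtain ⟨htlt, hpf, hf1, hlen, hper, hlyn, hmin⟩ := inv
  have hp1 : 1 ≤ p := by omega
  have hpf' : p ≤ f := Nat.le_of_dvd (by omega) hpf
  apply pvPerAux_spec (p - 1) s p 1 (by omega) le_rfl hp1 (Or.inl (by omega))
  · intro q hq1 hqp
    rw [← Bool.not_eq_true]
    rw [pvAllEq_iff]
    intro hall
    obtain ⟨o, hoe, hpfx, hmis⟩ := hlyn q hq1 hqp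
    have := hall o (by omega)
    rw [Nat.add_comm o q] at this
    exact absurd this (ne_of_lt hmis)
  · rw [pvAllEq_iff]
    intro o ho
    exact (hper o (by omega)).symm

-- at the else branch, the suffix at f strictly precedes every suffix starting below f
theorem pvG_dom {s : List Char} {f t p : Nat} (inv : pvInv s f t p)
    (hguard : f + t < s.length) (hgt : pvCh s (f + t) < pvCh s t) :
    ∀ q, q < f → pvLtB (s.drop f) (s.drop q) = true := by
  obtain ⟨htlt, hpf, hf1, hlen, hper, hlyn, hmin⟩ := inv
  have hp1 : 1 ≤ p := by omega
  have hpf' : p ≤ f := Nat.le_of_dvd (by omega) hpf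
  have hw2 : ∀ ω, ω < t → pvCh s (f + ω) = pvCh s ω := pvMatched hpf hpf' hper
  intro q hqf
  rcases Nat.eq_zero_or_pos q with hq0 | hq0
  · subst hq0
    apply pvLtB_of_mismatch t
    · intro o' ho'
      rw [pvGetD_drop s f o', pvGetD_drop s 0 o']
      show pvCh s (f + o') = pvCh s (0 + o')
      rw [Nat.zero_add]
      exact hw2 o' ho'
    · simp [List.length_drop]; omega
    · simp; omega
    · rw [pvGetD_drop s f t, pvGetD_drop s 0 t]
      show pvCh s (f + t) < pvCh s (0 + t)
      rw [Nat.zero_add]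
      exact hgt
  · by_cases hpq : p ∣ q
    · -- q a positive multiple of p below f: mismatch at offset t
      apply pvLtB_of_mismatch t
      · intro o' ho'
        rw [pvGetD_drop s f o', pvGetD_drop s q o']
        show pvCh s (f + o') = pvCh s (q + o')
        rw [hw2 o' ho', pvChain hper q hpq o' (by omega)]
      · simp [List.length_drop]; omega
      · simp [List.length_drop]; omega
      · rw [pvGetD_drop s f t, pvGetD_drop s q t]
        show pvCh s (f + t) < pvCh s (q + t)
        rw [pvChain hper q hpq t (by omega)]
        exact hgt
    · obtain ⟨o, hoi, hpfx, hmis⟩ := hmin q hq0 (by omega) hpq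
      by_cases hot : o < t
      · apply pvLtB_of_mismatch o
        · intro o' ho'
          rw [pvGetD_drop s f o', pvGetD_drop s q o']
          show pvCh s (f + o') = pvCh s (q + o')
          rw [hw2 o' (by omega)]
          exact hpfx o' ho'
        · simp [List.length_drop]; omega
        · simp [List.length_drop]; omega
        · rw [pvGetD_drop s f o, pvGetD_drop s q o]
          show pvCh s (f + o) < pvCh s (q + o)
          rw [hw2 o hot]
          exact hmis
      · apply pvLtB_of_mismatch t
        · intro o' ho'
          rw [pvGetD_drop s f o', pvGetD_drop s q o']
          show pvCh s (f + o') = pvCh s (q + o')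
          rw [hw2 o' ho']
          exact hpfx o' (by omega)
        · simp [List.length_drop]; omega
        · simp [List.length_drop]; omega
        · rw [pvGetD_drop s f t, pvGetD_drop s q t]
          show pvCh s (f + t) < pvCh s (q + t)
          rcases Nat.lt_or_ge t o with hto | hto
          · rw [← hpfx t hto]
            exact hgt
          · have : o = t := by omega
            subst this
            exact lt_trans hgt hmis

theorem pvInner (s : List Char)
    (IH : ∀ s' : List Char, s'.length < s.length → ∀ fuel', 2 * s'.length + 2 ≤ fuel' →
      pvLoopN fuel' s' 0 1 0 1 = pvBSpec s') :
    ∀ fuel f t p, pvInv s f t p → 2 * s.length + 2 ≤ fuel + f + t →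
      pvLoopN fuel s 0 f t p = pvBSpec s := by
  intro fuel
  induction fuel with
  | zero =>
    intro f t p inv hfuel
    obtain ⟨htlt, hpf, hf1, hlen, _, _, _⟩ := inv
    omega
  | succ fuel ih =>
    intro f t p inv hfuel
    have inv' := inv
    obtain ⟨htlt, hpf, hf1, hlen, hper, hlyn, hmin⟩ := inv'
    have hp1 : 1 ≤ p := by omega
    have hpf' : p ≤ f := Nat.le_of_dvd (by omega) hpf
    rw [pvLoopN]
    by_cases hguard : f + t < s.length
    · rw [if_pos hguard]
      have hz : pvCh s (0 + t) = pvCh s t := by rw [Nat.zero_add]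
      rw [hz]
      by_cases he : pvCh s (f + t) = pvCh s t
      · rw [if_pos he]
        by_cases htp : t + 1 = p
        · rw [if_pos htp]
          exact ih (f + p) 0 p (pvInv_E_eq inv hguard he htp) (by omega)
        · rw [if_neg htp]
          exact ih f (t + 1) p (pvInv_E_ne inv hguard he htp) (by omega)
      · rw [if_neg he]
        by_cases hlt : pvCh s t < pvCh s (f + t)
        · rw [if_pos hlt]
          have hp' : f + t + 1 - 0 = f + t + 1 := by omega
          rw [hp']
          exact ih (f + t + 1) 0 (f + t + 1) (pvInv_F inv hguard hlt) (by omega)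
        · rw [if_neg hlt]
          have hgt : pvCh s (f + t) < pvCh s t :=
            lt_of_le_of_ne (le_of_not_gt hlt) he
          -- restart on the suffix s.drop f
          rw [pvLoopN_drop f fuel s f (f + 1) 0 1 le_rfl (by omega)]
          have hflen : (s.drop f).length < s.length := by
            rw [List.length_drop]; omega
          have hfsub : f - f = 0 := by omega
          have hfsub' : f + 1 - f = 1 := by omega
          rw [hfsub, hfsub']
          rw [IH (s.drop f) hflen fuel (by rw [List.length_drop]; omega)]
          -- now identify pvBSpec s with the shifted pvBSpec (s.drop f)
          have hlen' : (s.drop f).length = s.length - f := List.length_drop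
          have hne' : s.drop f ≠ [] := by
            intro hh
            have := congrArg List.length hh
            rw [hlen'] at this
            simp at this
            omega
          have hB'lt : pvBestAux (s.drop f) 1 0 < (s.drop f).length :=
            pvBestAux_lt_length _ hne'
          have hdom := pvG_dom inv hguard hgt
          have hdd : ∀ r : Nat, s.drop (f + r) = (s.drop f).drop r := by
            intro r
            rw [List.drop_drop]
          have hminX : ∀ q, q < s.length → q ≠ f + pvBestAux (s.drop f) 1 0 →
              pvLtB (s.drop (f + pvBestAux (s.drop f) 1 0)) (s.drop q) = true := by
            intro q hq hqne
            by_cases hqf : q < f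
            · by_cases hB0 : pvBestAux (s.drop f) 1 0 = 0
              · rw [hB0]
                simpa using hdom q hqf
              · have h0ne : (0 : Nat) ≠ pvBestAux (s.drop f) 1 0 := fun hh => hB0 hh.symm
                have h1 : pvLtB (s.drop (f + pvBestAux (s.drop f) 1 0)) (s.drop f) = true := by
                  rw [hdd]
                  have := pvBestAux_isMin (s.drop f) 0 (by omega) h0ne
                  simpa using this
                exact pvLtB_trans _ _ _ h1 (hdom q hqf)
            · have hq' : q - f < (s.drop f).length := by rw [hlen']; omega
              have := pvBestAux_isMin (s.drop f) (q - f) hq' (by omega)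
              rw [← hdd, ← hdd (q - f)] at this
              have hqq : f + (q - f) = q := by omega
              rwa [hqq] at this
          have hbest : pvBestAux s 1 0 = f + pvBestAux (s.drop f) 1 0 := by
            apply pvBestAux_eq s _ (by rw [hlen'] at hB'lt; omega) hminX
          show (pvBestAux (s.drop f) 1 0 + f,
              pvPerAux ((s.drop f).drop (pvBestAux (s.drop f) 1 0)) 1) = pvBSpec s
          unfold pvBSpec
          rw [hbest, hdd, Nat.add_comm f (pvBestAux (s.drop f) 1 0)]
    · rw [if_neg hguard]
      have hend : f + t = s.length := by omega
      unfold pvBSpec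
      have hn1 : 1 ≤ s.length := by omega
      have hbest : pvBestAux s 1 0 = 0 := by
        apply pvBestAux_eq s 0 (by omega)
        intro q hq hq0
        have := pvExit_best inv hend q hq hq0
        simpa using this
      rw [hbest]
      have hper' : pvPerAux (s.drop 0) 1 = p := by
        rw [List.drop_zero]
        exact pvExit_per inv hend
      rw [hper']

theorem pvMain : ∀ (n : Nat) (s : List Char), s.length ≤ n →
    ∀ fuel, 2 * s.length + 2 ≤ fuel → pvLoopN fuel s 0 1 0 1 = pvBSpec s := by
  intro n
  induction n with
  | zero =>
    intro s hle fuel hfuel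
    have hs : s = [] := List.length_eq_zero_iff.mp (by omega)
    subst hs
    obtain ⟨fuel', rfl⟩ : ∃ m, fuel = m + 1 := ⟨fuel - 1, by omega⟩
    rw [pvLoopN]
    simp [pvBSpec, pvBestAux, pvPerAux]
  | succ n ihn =>
    intro s hle fuel hfuel
    by_cases hs : s.length = 0
    · have hs' : s = [] := List.length_eq_zero_iff.mp hs
      subst hs'
      obtain ⟨fuel', rfl⟩ : ∃ m, fuel = m + 1 := ⟨fuel - 1, by omega⟩
      rw [pvLoopN]
      simp [pvBSpec, pvBestAux, pvPerAux]
    · apply pvInner s (fun s' hlt fuel' hf' => ihn s' (by omega) fuel' hf') fuel 1 0 1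
      · exact ⟨by omega, dvd_rfl, le_rfl, by omega, fun o ho => by omega,
          fun e he1 he2 => by omega, fun q h1 h2 h3 => absurd (Nat.one_dvd q) h3⟩
      · omega

theorem pvChA_natCast (s : List Char) (n : Nat) : pvChA s (n : Int) = pvCh s n := by
  simp [pvChA, pvCh, PySem.List.pyGet?_natCast, List.getD_eq_getElem?_getD]

theorem pvLoopA_eq_loopN : ∀ (fuel : Nat) (s : List Char) (c f t p : Nat),
    1 ≤ f → c ≤ f → 1 ≤ p →
    pvLoopA fuel s ((c : Int) - 1) ((f : Int) - 1) ((t : Int) + 1) (p : Int) =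
      (fun x : Nat × Nat => ((x.1 : Int) - 1, (x.2 : Int))) (pvLoopN fuel s c f t p) := by
  intro fuel
  induction fuel with
  | zero => intro s c f t p _ _ _; simp [pvLoopA, pvLoopN]
  | succ fuel ih =>
    intro s c f t p hf hcf hp
    have e1 : ((f : Int) - 1) + ((t : Int) + 1) = ((f + t : Nat) : Int) := by push_cast; ring
    have e2 : ((c : Int) - 1) + ((t : Int) + 1) = ((c + t : Nat) : Int) := by push_cast; ring
    rw [pvLoopA, pvLoopN, e1, e2, pvChA_natCast, pvChA_natCast, PySem.List.len_eq]
    by_cases hguard : f + t < s.length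
    · rw [if_pos (by exact_mod_cast hguard), if_pos hguard]
      by_cases he : pvCh s (f + t) = pvCh s (c + t)
      · rw [if_pos he, if_pos he]
        by_cases htp : t + 1 = p
        · rw [if_pos (by rw [← htp]; push_cast; ring), if_pos htp]
          have this1 := ih s c (f + p) 0 p (by omega) (by omega) hp
          have a1 : ((f + p : Nat) : Int) - 1 = ((f : Int) - 1) + (p : Int) := by push_cast; ring
          have a2 : (((0 : Nat) : Int)) + 1 = (1 : Int) := by norm_num
          rw [a1, a2] at this1
          exact this1
        · rw [if_neg (by intro hh; exact htp (by exact_mod_cast hh)), if_neg htp]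
          have this1 := ih s c f (t + 1) p hf hcf hp
          have a1 : (((t + 1 : Nat)) : Int) + 1 = ((t : Int) + 1) + 1 := by push_cast; ring
          rw [a1] at this1
          exact this1
      · rw [if_neg he, if_neg he]
        by_cases hlt : pvCh s (c + t) < pvCh s (f + t)
        · rw [if_pos hlt, if_pos hlt]
          have this1 := ih s c (f + t + 1) 0 (f + t + 1 - c) (by omega) (by omega) (by omega)
          have a1 : ((f + t + 1 : Nat) : Int) - 1 = ((f + t : Nat) : Int) := by push_cast; ring
          have a2 : (((0 : Nat) : Int)) + 1 = (1 : Int) := by norm_num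
          have a3 : ((f + t + 1 - c : Nat) : Int) = ((f + t : Nat) : Int) - ((c : Int) - 1) := by
            push_cast [Nat.cast_sub (by omega : c ≤ f + t + 1)]; ring
          rw [a1, a2, a3] at this1
          exact this1
        · rw [if_neg hlt, if_neg hlt]
          have this1 := ih s f (f + 1) 0 1 (by omega) (by omega) (by omega)
          have a1 : ((f + 1 : Nat) : Int) - 1 = ((f : Int) - 1) + 1 := by push_cast; ring
          have a2 : (((0 : Nat) : Int)) + 1 = (1 : Int) := by norm_num
          have a3 : (((1 : Nat)) : Int) = (1 : Int) := by norm_num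
          rw [a1, a2, a3] at this1
          exact this1
    · rw [if_neg (by exact_mod_cast hguard), if_neg hguard]

-- ===== VERDICT (by name: the statement is the Claim_ definition above) =====
theorem max_suffix_spec : Claim_equal_max_suffix := by
  intro s _
  show max_suffix s = max_suffix_alt s
  unfold max_suffix max_suffix_alt
  have h := pvLoopA_eq_loopN (2 * s.toList.length + 2) s.toList 0 1 0 1 le_rfl (by omega) le_rfl
  have b1 : (((0 : Nat)) : Int) - 1 = (-1 : Int) := by norm_num
  have b2 : (((1 : Nat)) : Int) - 1 = (0 : Int) := by norm_num
  have b3 : (((0 : Nat)) : Int) + 1 = (1 : Int) := by norm_num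
  have b4 : (((1 : Nat)) : Int) = (1 : Int) := by norm_num
  rw [b1, b2, b3, b4] at h
  rw [h, pvMain s.toList.length s.toList le_rfl _ le_rfl]
  rfl
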